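-- pv_equiv track=rewrite | github.com/HighnessAtharva/450-DSA-Python | String/Split Binary String into two substrings with equal 1s and 0s.py | maxSubStr
-- ===== SOURCE A (Python) =====
-- def maxSubStr(str):
--
-- 	# To store the count of 0s and 1s
-- 	count0 = 0
-- 	count1 = 0
-- 	n = len(str)
--
-- 	# To store the count of maximum substrings str can be divided into
-- 	cnt = 0
--
-- 	for i in range(n):
-- 		if str[i] == '0':
-- 			count0 += 1
-- 		else:
-- 			count1 += 1
-- 		if count0 == count1:
-- 			cnt += 1
--
-- # It is not possible to split the string
-- 	if count0 != count1:
-- 		return -1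
-- 	return cnt
-- ===== SOURCE B (Python) =====
-- def maxSubStr(str):
--     # Greedy segmentation: repeatedly scan for the END of the shortest
--     # balanced chunk starting at i, cut it off, and count the chunks.
--     def next_balance_point(i):
--         bal = 0
--         for j in range(i, len(str)):
--             bal += -1 if str[j] == '0' else 1
--             if bal == 0:
--                 return j + 1
--         return None
--
--     count = 0
--     i = 0
--     while i < len(str):
--         k = next_balance_point(i)
--         if k is None:
--             return -1
--         i = k
--         count += 1
--     return count
-- ===== Notes on version B (the rewrite author's own statement) =====
-- stated objective: alternative
-- what changed: Greedy segmentation: an outer loop repeatedly scans for the end of the shortest balanced chunk and counts chunks, instead of A's single pass with two running character counters compared at every step.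
import Mathlib
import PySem

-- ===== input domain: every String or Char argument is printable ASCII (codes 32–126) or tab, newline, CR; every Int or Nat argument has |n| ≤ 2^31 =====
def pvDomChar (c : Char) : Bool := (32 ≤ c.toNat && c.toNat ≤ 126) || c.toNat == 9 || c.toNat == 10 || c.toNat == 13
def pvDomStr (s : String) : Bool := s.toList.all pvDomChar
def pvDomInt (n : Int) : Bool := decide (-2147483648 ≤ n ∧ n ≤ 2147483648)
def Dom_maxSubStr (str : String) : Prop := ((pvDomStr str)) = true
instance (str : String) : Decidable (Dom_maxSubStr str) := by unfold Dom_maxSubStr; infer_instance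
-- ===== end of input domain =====

-- B counts balanced chunks by greedy segmentation (an outer loop repeatedly cutting off the shortest balanced chunk) instead of A's single pass with two running counters (objective: alternative).


-- ===== PORT A =====
-- loop over the characters carrying (count0, count1, cnt), exactly as A does
def maxSubStrStep (p : Int × Int × Int) (c : Char) : Int × Int × Int :=
  let count0 := if c = '0' then p.1 + 1 else p.1
  let count1 := if c = '0' then p.2.1 else p.2.1 + 1
  let cnt := if count0 = count1 then p.2.2 + 1 else p.2.2
  (count0, count1, cnt)

def maxSubStr (str : String) : Int :=
  let st := str.toList.foldl maxSubStrStep (0, 0, 0)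
  if st.1 ≠ st.2.1 then -1 else st.2.2

-- ===== PORT B =====
-- B's next_balance_point: scan j = i, i+1, … for the first j+1 with zero balance of s[i..j].
-- fuel (≥ s.length - j at the call) only makes the scan structurally recursive; it never runs out.
def nextZeroAux (s : List Char) : Nat → Int → Nat → Option Nat
  | 0, _, _ => none
  | fuel + 1, bal, j =>
    if h : j < s.length then
      let bal' := bal + (if s[j] = '0' then (-1 : Int) else 1)
      if bal' = 0 then some (j + 1) else nextZeroAux s fuel bal' (j + 1)
    else none

-- B's outer while loop: cut chunks off at i, counting them; fuel (≥ chunks left) never runs out.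
def altGo (s : List Char) : Nat → Nat → Int → Int
  | 0, _, count => count
  | fuel + 1, i, count =>
    if i < s.length then
      match nextZeroAux s (s.length - i) 0 i with
      | none => -1
      | some k => altGo s fuel k (count + 1)
    else count

def maxSubStr_alt (str : String) : Int :=
  altGo str.toList (str.toList.length + 1) 0 0

-- ===== PRECONDITION & SPEC =====
def Spec_maxSubStr (str : String) (out : Int) : Prop := out = maxSubStr_alt str
instance (str : String) (out : Int) : Decidable (Spec_maxSubStr str out) := by unfold Spec_maxSubStr; infer_instance

-- ===== CLAIM (what is proved, stated in full; the proofs are below) =====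
def Claim_equal_maxSubStr : Prop := ∀ (str : String), Dom_maxSubStr str → Spec_maxSubStr str (maxSubStr str)

-- ===== LEMMAS AND PROOFS =====

-- proof-side: character balance contribution
def pvDelta (c : Char) : Int := if c = '0' then -1 else 1

-- proof-side: number of nonempty prefixes whose running sum from bal hits 0
def zeros : Int → List Int → Nat
  | _, [] => 0
  | bal, x :: xs => (if bal + x = 0 then 1 else 0) + zeros (bal + x) xs

theorem zeros_append (xs : List Int) : ∀ (ys : List Int) (bal : Int),
    zeros bal (xs ++ ys) = zeros bal xs + zeros (bal + xs.sum) ys := by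
  induction xs with
  | nil => intro ys bal; simp [zeros]
  | cons x xs ih =>
    intro ys bal
    simp only [List.cons_append, zeros, ih, List.sum_cons]
    have hc : bal + x + xs.sum = bal + (x + xs.sum) := by ring
    rw [hc]
    omega

theorem zeros_pos_of_sum (l : List Int) : ∀ (bal : Int), l ≠ [] → bal + l.sum = 0 → 0 < zeros bal l := by
  induction l with
  | nil => intro bal h; simp at h
  | cons x xs ih =>
    intro bal _ hs
    simp only [List.sum_cons] at hs
    simp only [zeros]
    by_cases hx : xs = []
    · subst hx
      simp only [List.sum_nil] at hs
      rw [if_pos (by omega : bal + x = 0)]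
      omega
    · have := ih (bal + x) hx (by omega)
      omega

-- A's foldl components vs. the balance sequence from state (c0, c1, cnt)
theorem loop_inv (l : List Char) : ∀ (c0 c1 cnt : Int),
    (l.foldl maxSubStrStep (c0, c1, cnt)).2.1 - (l.foldl maxSubStrStep (c0, c1, cnt)).1
      = (c1 - c0) + (l.map pvDelta).sum
    ∧ (l.foldl maxSubStrStep (c0, c1, cnt)).2.2
      = cnt + (zeros (c1 - c0) (l.map pvDelta) : Int) := by
  induction l with
  | nil => intro c0 c1 cnt; simp [zeros]
  | cons c cs ih =>
    intro c0 c1 cnt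
    simp only [List.foldl_cons, List.map_cons, List.sum_cons, zeros, maxSubStrStep, pvDelta]
    by_cases hc : c = '0'
    · simp only [hc, if_pos]
      obtain ⟨h1, h2⟩ := ih (c0 + 1) c1 (if c0 + 1 = c1 then cnt + 1 else cnt)
      have hbal : c1 - (c0 + 1) = c1 - c0 + -1 := by ring
      refine ⟨by rw [h1]; ring, ?_⟩
      rw [h2, hbal]
      by_cases hz : c0 + 1 = c1
      · rw [if_pos hz, if_pos (by omega : c1 - c0 + -1 = 0)]; push_cast; ring
      · rw [if_neg hz, if_neg (by omega : ¬ c1 - c0 + -1 = 0)]; push_cast; ring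
    · simp only [if_neg hc]
      obtain ⟨h1, h2⟩ := ih c0 (c1 + 1) (if c0 = c1 + 1 then cnt + 1 else cnt)
      have hbal : (c1 + 1) - c0 = c1 - c0 + 1 := by ring
      refine ⟨by rw [h1]; ring, ?_⟩
      rw [h2, hbal]
      by_cases hz : c0 = c1 + 1
      · rw [if_pos hz, if_pos (by omega : c1 - c0 + 1 = 0)]; push_cast; ring
      · rw [if_neg hz, if_neg (by omega : ¬ c1 - c0 + 1 = 0)]; push_cast; ring

-- a failed scan means the running sum never returns to 0 on the tail
theorem nz_none (s : List Char) : ∀ (fuel : Nat) (bal : Int) (j : Nat),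
    s.length - j ≤ fuel → nextZeroAux s fuel bal j = none →
    zeros bal ((s.drop j).map pvDelta) = 0 := by
  intro fuel
  induction fuel with
  | zero =>
    intro bal j hf _
    rw [List.drop_of_length_le (by omega)]
    simp [zeros]
  | succ fuel ih =>
    intro bal j hf h
    by_cases hj : j < s.length
    · rw [nextZeroAux, dif_pos hj] at h
      have hd : s.drop j = s[j] :: s.drop (j + 1) := List.drop_eq_getElem_cons hj
      rw [hd]
      simp only [List.map_cons, zeros]
      by_cases hz : bal + (if s[j] = '0' then (-1 : Int) else 1) = 0
      · rw [if_pos hz] at h; simp at h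
      · rw [if_neg hz] at h
        have h0 : bal + pvDelta s[j] = bal + (if s[j] = '0' then (-1 : Int) else 1) := by
          simp [pvDelta]
        rw [h0, if_neg hz, ih _ (j + 1) (by omega) h]
    · rw [List.drop_of_length_le (by omega)]
      simp [zeros]

-- a successful scan at k: the chunk s[j..k) balances, is the shortest such, and j < k ≤ |s|
theorem nz_some (s : List Char) : ∀ (fuel : Nat) (bal : Int) (j k : Nat),
    nextZeroAux s fuel bal j = some k →
    j < k ∧ k ≤ s.length
    ∧ bal + (((s.drop j).take (k - j)).map pvDelta).sum = 0
    ∧ zeros bal (((s.drop j).take (k - j)).map pvDelta) = 1 := by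
  intro fuel
  induction fuel with
  | zero => intro bal j k h; simp [nextZeroAux] at h
  | succ fuel ih =>
    intro bal j k h
    by_cases hj : j < s.length
    · rw [nextZeroAux, dif_pos hj] at h
      have hd : s.drop j = s[j] :: s.drop (j + 1) := List.drop_eq_getElem_cons hj
      have h0 : bal + pvDelta s[j] = bal + (if s[j] = '0' then (-1 : Int) else 1) := by
        simp [pvDelta]
      by_cases hz : bal + (if s[j] = '0' then (-1 : Int) else 1) = 0
      · rw [if_pos hz] at h
        simp only [Option.some.injEq] at h
        subst h
        have hk : j + 1 - j = 1 := by omega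
        rw [hd, hk]
        simp only [List.take_succ_cons, List.take_zero, List.map_cons, List.map_nil,
          List.sum_cons, List.sum_nil, zeros]
        refine ⟨by omega, by omega, by omega, ?_⟩
        rw [if_pos (show bal + pvDelta s[j] = 0 by omega)]
      · rw [if_neg hz] at h
        obtain ⟨hlt, hle, hsum, hzer⟩ := ih _ (j + 1) k h
        have hk : k - j = (k - (j + 1)) + 1 := by omega
        rw [hd, hk]
        simp only [List.take_succ_cons, List.map_cons, List.sum_cons, zeros]
        refine ⟨by omega, hle, by omega, ?_⟩
        rw [if_neg (show ¬ bal + pvDelta s[j] = 0 by omega), h0, hzer]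
    · rw [nextZeroAux, dif_neg hj] at h; simp at h
-- (the decreasing_by line above is never needed; structural recursion)

-- B's outer loop computes -1 / count + zeros of the remaining suffix
theorem altGo_eq (s : List Char) : ∀ (fuel i : Nat) (count : Int),
    s.length - i < fuel →
    altGo s fuel i count =
      if (((s.drop i).map pvDelta).sum ≠ 0) then -1
      else count + (zeros 0 ((s.drop i).map pvDelta) : Int) := by
  intro fuel
  induction fuel with
  | zero => intro i count hf; omega
  | succ fuel ih =>
    intro i count hf
    by_cases hi : i < s.length
    · rw [altGo, if_pos hi]
      cases h : nextZeroAux s (s.length - i) 0 i with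
      | none =>
        have hz := nz_none s (s.length - i) 0 i (by omega) h
        have hne : (s.drop i).map pvDelta ≠ [] := by
          simp [List.drop_eq_nil_iff]; omega
        have hs : ¬ (0 + ((s.drop i).map pvDelta).sum = 0) := by
          intro hc
          have := zeros_pos_of_sum ((s.drop i).map pvDelta) 0 hne hc
          omega
        rw [if_pos (by omega : ((s.drop i).map pvDelta).sum ≠ 0)]
      | some k =>
        obtain ⟨hlt, hle, hsum, hzer⟩ := nz_some s (s.length - i) 0 i k h
        have hsplit : s.drop i = (s.drop i).take (k - i) ++ s.drop k := by
          have h1 : (s.drop i).drop (k - i) = s.drop k := by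
            rw [List.drop_drop]
            congr 1
            omega
          conv_lhs => rw [← List.take_append_drop (k - i) (s.drop i)]
          rw [h1]
        show altGo s fuel k (count + 1) = _
        rw [ih k (count + 1) (by omega), hsplit, List.map_append, List.sum_append, zeros_append]
        have hps : (((s.drop i).take (k - i)).map pvDelta).sum = 0 := by omega
        rw [hps, hzer]
        simp only [zero_add]
        split_ifs <;> push_cast <;> omega
    · rw [altGo, if_neg hi, List.drop_of_length_le (by omega)]
      simp [zeros]

-- ===== VERDICT (by name: the statement is the Claim_ definition above) =====
theorem maxSubStr_spec : Claim_equal_maxSubStr := by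
  intro str _
  unfold Spec_maxSubStr maxSubStr maxSubStr_alt
  obtain ⟨h1, h2⟩ := loop_inv str.toList 0 0 0
  simp only [sub_zero, zero_add] at h1 h2
  rw [altGo_eq str.toList (str.toList.length + 1) 0 0 (by omega)]
  simp only [List.drop_zero]
  split_ifs with hne hne2 <;> simp_all <;> omega
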